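-- pv_equiv track=rewrite | github.com/christeph200/2048Game | logic.py | compress_right
-- ===== SOURCE A (Python) =====
-- def compress_right(mat):
--
--     # bool variable to determine
--     # any change happened or not
--
--     # empty grid
--     new_mat = []
--
--     # intitalise with zero
--     for i in range(4):
--         new_mat.append([0] * 4)
--
--     # here we will shift entries
--     # of each cell to it's extreme
--     # right row by row
--
--     for i in range(4):
--         pos = 3
--
--         # loop to traverse each column
--         # in respective row
--         for j in range(3,-1,-1): #starting from the end of row as here we deal with right shifting
--             if(mat[i][j] != 0):
--
--                 # if cell is non empty then
--                 # we will shift it's value to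
--                 # previous empty cell in that row
--                 # denoted by pos variable
--                 new_mat[i][pos] = mat[i][j]
--
--
--
--                 pos -= 1 # decrementing to next empty value
--
--     # returning new compressed matrix
--
--     return new_mat
-- ===== SOURCE B (Python) =====
-- def compress_right(mat):
--     result = []
--     for i in range(4):
--         nz = [mat[i][j] for j in range(4) if mat[i][j] != 0]
--         result.append([0] * (4 - len(nz)) + nz)
--     return result
-- ===== Notes on version B (the rewrite author's own statement) =====
-- stated objective: simpler
-- what changed: Replaces A's preallocated zero grid with a decrementing write pointer by building each output row directly as its nonzero entries in order, left-padded with a computed number of zeros (no zero matrix, no position bookkeeping).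
import Mathlib
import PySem

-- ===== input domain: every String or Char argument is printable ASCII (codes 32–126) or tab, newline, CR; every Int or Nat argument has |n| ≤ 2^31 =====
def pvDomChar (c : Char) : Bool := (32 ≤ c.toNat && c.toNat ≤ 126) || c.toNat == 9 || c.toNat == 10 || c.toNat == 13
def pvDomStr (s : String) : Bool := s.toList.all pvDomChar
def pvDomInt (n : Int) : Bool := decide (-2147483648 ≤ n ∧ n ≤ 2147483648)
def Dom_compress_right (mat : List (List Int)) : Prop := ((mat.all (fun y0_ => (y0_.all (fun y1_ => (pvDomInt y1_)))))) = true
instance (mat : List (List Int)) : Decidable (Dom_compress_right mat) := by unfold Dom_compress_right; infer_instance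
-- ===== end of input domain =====

-- B replaces A's preallocated zero grid with a decrementing write pointer by a per-row
-- extract-nonzeros-then-pad-left construction (objective: simpler). Return value only; neither
-- program mutates its argument.

-- ===== PORT A =====
-- Python in-place list assignment l[i] = v, exact for an in-range index (the only way A uses
-- it; under Pre_ the write index pos stays in 0..3); negative wraparound included for exactness.
def pyAssign {α : Type} (l : List α) (i : Int) (v : α) : List α :=
  l.set (if i < 0 then ((l : List α).length + i).toNat else i.toNat) v

-- one inner-loop iteration of A: state is (new_mat, pos), j the column index.
-- mat[i][j]: under Pre_ both lookups are in range, so the getD defaults are never taken.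
def aStep (mat : List (List Int)) (i : Int) (st : List (List Int) × Int) (j : Int) :
    List (List Int) × Int :=
  let v := (PySem.List.pyGet? ((PySem.List.pyGet? mat i).getD []) j).getD 0
  if v ≠ 0 then
    let nri := (PySem.List.pyGet? st.1 i).getD []
    (pyAssign st.1 i (pyAssign nri st.2 v), st.2 - 1)
  else st

def compress_right (mat : List (List Int)) : List (List Int) :=
  -- new_mat = []; for i in range(4): new_mat.append([0]*4)
  let new_mat := (PySem.List.pyRange 0 4 1).foldl
    (fun acc _ => acc ++ [List.replicate 4 (0 : Int)]) []
  -- for i in range(4): pos = 3; for j in range(3,-1,-1): …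
  (PySem.List.pyRange 0 4 1).foldl
    (fun nm i => ((PySem.List.pyRange 3 (-1) (-1)).foldl (aStep mat i) (nm, 3)).1)
    new_mat

-- ===== PORT B =====
-- nz = [mat[i][j] for j in range(4) if mat[i][j] != 0]; under Pre_ every lookup is in
-- range, so the getD defaults are never taken
def bNz (mat : List (List Int)) (i : Int) : List Int :=
  (PySem.List.pyRange 0 4 1).filterMap (fun j =>
    let v := (PySem.List.pyGet? ((PySem.List.pyGet? mat i).getD []) j).getD 0
    if v ≠ 0 then some v else none)

def compress_right_alt (mat : List (List Int)) : List (List Int) :=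
  (PySem.List.pyRange 0 4 1).foldl (fun result i =>
    let nz := bNz mat i
    result ++ [List.replicate (4 - nz.length) (0 : Int) ++ nz]) []

-- ===== PRECONDITION & SPEC =====
-- exactly the inputs both programs return on: at least 4 rows whose first 4 each hold at
-- least 4 entries (both raise IndexError otherwise; both read only the top-left 4x4)
def Pre_compress_right (mat : List (List Int)) : Prop :=
  4 ≤ mat.length ∧ ∀ row ∈ mat.take 4, 4 ≤ row.length
instance (mat : List (List Int)) : Decidable (Pre_compress_right mat) := by
  unfold Pre_compress_right; infer_instance

def pvWitness_compress_right : List (List Int) :=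
  [[2, 0, 2, 4], [0, 0, 0, 0], [0, 8, 0, 0], [2, 2, 2, 2]]

def Spec_compress_right (mat : List (List Int)) (out : List (List Int)) : Prop :=
  out = compress_right_alt mat
instance (mat : List (List Int)) (out : List (List Int)) : Decidable (Spec_compress_right mat out) := by
  unfold Spec_compress_right; infer_instance

-- ===== CLAIM (what is proved, stated in full; the proofs are below) =====
def Claim_equal_compress_right : Prop :=
  ∀ (mat : List (List Int)), Dom_compress_right mat → Pre_compress_right mat →
    Spec_compress_right mat (compress_right mat)

-- ===== LEMMAS AND PROOFS =====

-- B's row construction, named for the proofs (definitionally B's map body)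
def padRow (row : List Int) : List Int :=
  List.replicate (4 - (row.filter (fun x => x ≠ 0)).length) (0 : Int) ++
    row.filter (fun x => x ≠ 0)

lemma length_pyAssign {α : Type} (l : List α) (i : Int) (v : α) :
    (pyAssign l i v).length = l.length := by simp [pyAssign]

lemma pyAssign_pyAssign {α : Type} (l : List α) (i : Int) (v w : α) :
    pyAssign (pyAssign l i v) i w = pyAssign l i w := by
  simp [pyAssign]

lemma pyGet_pyAssign_self (l : List (List Int)) (i : Int) (v : List Int)
    (h0 : 0 ≤ i) (h : i < (l.length : Int)) :
    PySem.List.pyGet? (pyAssign l i v) i = some v := by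
  have hnat : i.toNat < l.length := by omega
  simp [pyAssign, PySem.List.pyGet?, PySem.List.pyIdx?, h0, h, not_lt.mpr h0,
    List.getElem_set_self]

lemma set_of_get (l : List (List Int)) (i : Int) (v : List Int)
    (h0 : 0 ≤ i) (hget : PySem.List.pyGet? l i = some v) :
    pyAssign l i v = l := by
  have h1 : l[i.toNat]? = some v := by
    simp [PySem.List.pyGet?, PySem.List.pyIdx?, h0] at hget
    by_cases h : i < (l.length : Int)
    · simpa [h] using hget
    · simp [h] at hget
  have h2 : i.toNat < l.length := (List.getElem?_eq_some_iff.mp h1).1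
  apply List.ext_getElem?
  intro m
  by_cases hm : m = i.toNat
  · subst hm; simp [pyAssign, not_lt.mpr h0, List.getElem?_set_self h2, h1]
  · simp [pyAssign, not_lt.mpr h0, List.getElem?_set_ne (show i.toNat ≠ m by omega)]

lemma gA3 (a b c d : Int) (t : List Int) :
    (PySem.List.pyGet? (a :: b :: c :: d :: t) 3).getD 0 = d := by
  simp [PySem.List.pyGet?, PySem.List.pyIdx?]
  rw [if_pos (by omega)]
  simp
lemma gA2 (a b c d : Int) (t : List Int) :
    (PySem.List.pyGet? (a :: b :: c :: d :: t) 2).getD 0 = c := by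
  simp [PySem.List.pyGet?, PySem.List.pyIdx?]
  rw [if_pos (by omega)]
  simp
lemma gA1 (a b c d : Int) (t : List Int) :
    (PySem.List.pyGet? (a :: b :: c :: d :: t) 1).getD 0 = b := by
  simp [PySem.List.pyGet?, PySem.List.pyIdx?]
  rw [if_pos (by omega)]
  simp
lemma gA0 (a b c d : Int) (t : List Int) :
    (PySem.List.pyGet? (a :: b :: c :: d :: t) 0).getD 0 = a := by
  simp [PySem.List.pyGet?, PySem.List.pyIdx?]
  rw [if_pos (by omega)]
  simp

lemma pa3 {α : Type} (w x y z v : α) : pyAssign [w, x, y, z] 3 v = [w, x, y, v] := by simp [pyAssign]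
lemma pa2 {α : Type} (w x y z v : α) : pyAssign [w, x, y, z] 2 v = [w, x, v, z] := by simp [pyAssign]
lemma pa1 {α : Type} (w x y z v : α) : pyAssign [w, x, y, z] 1 v = [w, v, y, z] := by simp [pyAssign]
lemma pa0 {α : Type} (w x y z v : α) : pyAssign [w, x, y, z] 0 v = [v, x, y, z] := by simp [pyAssign]

-- A's inner loop on a length-4 row writes exactly B's padded row into slot i of new_mat
lemma inner_eq (mat : List (List Int)) (i : Int) (a b c d : Int) (t : List Int)
    (nm : List (List Int))
    (hrow : PySem.List.pyGet? mat i = some (a :: b :: c :: d :: t))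
    (hnm : PySem.List.pyGet? nm i = some [0, 0, 0, 0])
    (h0 : 0 ≤ i) (hlt : i < (nm.length : Int)) :
    ((PySem.List.pyRange 3 (-1) (-1)).foldl (aStep mat i) (nm, 3)).1
      = pyAssign nm i (padRow [a, b, c, d]) := by
  have hr : PySem.List.pyRange 3 (-1) (-1) = [3, 2, 1, 0] := by decide
  have hlt' : ∀ v, i < ((pyAssign nm i v).length : Int) := by
    intro v; rw [length_pyAssign]; exact hlt
  rw [hr]
  simp only [List.foldl, aStep, hrow, Option.getD_some, gA3, gA2, gA1, gA0]
  by_cases hd : d = 0 <;> by_cases hc : c = 0 <;> by_cases hb : b = 0 <;> by_cases ha : a = 0 <;>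
    simp [hnm, padRow, ha, hb, hc, hd, pa3, pa2, pa1, pa0,
      pyGet_pyAssign_self _ _ _ h0 hlt,
      pyAssign_pyAssign, set_of_get _ _ _ h0 hnm]

-- B's comprehension over j = 0..3 is the filter of the row's first four entries
lemma bRow (mat : List (List Int)) (i : Int) (a b c d : Int) (t : List Int)
    (hrow : PySem.List.pyGet? mat i = some (a :: b :: c :: d :: t)) :
    bNz mat i = [a, b, c, d].filter (fun x => x ≠ 0) := by
  have hpr : PySem.List.pyRange 0 4 1 = [0, 1, 2, 3] := by decide
  simp only [bNz, hpr, List.filterMap, hrow, Option.getD_some, gA3, gA2, gA1, gA0]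
  by_cases hd : d = 0 <;> by_cases hc : c = 0 <;> by_cases hb : b = 0 <;> by_cases ha : a = 0 <;>
    simp [ha, hb, hc, hd]

lemma len4 {α : Type} (l : List α) (h : 4 ≤ l.length) :
    ∃ a b c d t, l = a :: b :: c :: d :: t := by
  match l, h with
  | a :: b :: c :: d :: t, _ => exact ⟨a, b, c, d, t, rfl⟩

theorem compress_right_spec : Claim_equal_compress_right := by
  intro mat _ hpre
  obtain ⟨hlen, hrows⟩ := hpre
  obtain ⟨r0, r1, r2, r3, rest, rfl⟩ :
      ∃ r0 r1 r2 r3 rest, mat = r0 :: r1 :: r2 :: r3 :: rest := by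
    match mat, hlen with
    | r0 :: r1 :: r2 :: r3 :: rest, _ => exact ⟨r0, r1, r2, r3, rest, rfl⟩
  obtain ⟨a0, b0, c0, d0, t0, rfl⟩ := len4 r0 (hrows r0 (by simp))
  obtain ⟨a1, b1, c1, d1, t1, rfl⟩ := len4 r1 (hrows r1 (by simp))
  obtain ⟨a2, b2, c2, d2, t2, rfl⟩ := len4 r2 (hrows r2 (by simp))
  obtain ⟨a3, b3, c3, d3, t3, rfl⟩ := len4 r3 (hrows r3 (by simp))
  unfold Spec_compress_right compress_right
  have hout : PySem.List.pyRange 0 4 1 = [0, 1, 2, 3] := by decide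
  have hinit : (PySem.List.pyRange 0 4 1).foldl
      (fun acc _ => acc ++ [List.replicate 4 (0 : Int)]) ([] : List (List Int))
      = [[0, 0, 0, 0], [0, 0, 0, 0], [0, 0, 0, 0], [0, 0, 0, 0]] := by decide
  rw [hinit, hout]
  simp only [List.foldl]
  rw [inner_eq _ 0 a0 b0 c0 d0 t0 _
        (by simp [PySem.List.pyGet?, PySem.List.pyIdx?]; rw [if_pos (by omega)]; simp)
        (by simp [PySem.List.pyGet?, PySem.List.pyIdx?]) (by norm_num) (by norm_num),
      pa0]
  rw [inner_eq _ 1 a1 b1 c1 d1 t1 _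
        (by simp [PySem.List.pyGet?, PySem.List.pyIdx?]; rw [if_pos (by omega)]; simp)
        (by simp [PySem.List.pyGet?, PySem.List.pyIdx?]) (by norm_num) (by norm_num),
      pa1]
  rw [inner_eq _ 2 a2 b2 c2 d2 t2 _
        (by simp [PySem.List.pyGet?, PySem.List.pyIdx?]; rw [if_pos (by omega)]; simp)
        (by simp [PySem.List.pyGet?, PySem.List.pyIdx?]) (by norm_num) (by norm_num),
      pa2]
  rw [inner_eq _ 3 a3 b3 c3 d3 t3 _
        (by simp [PySem.List.pyGet?, PySem.List.pyIdx?]; rw [if_pos (by omega)]; simp)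
        (by simp [PySem.List.pyGet?, PySem.List.pyIdx?]) (by norm_num) (by norm_num),
      pa3]
  unfold compress_right_alt
  rw [hout]
  simp only [List.foldl]
  rw [bRow _ 0 a0 b0 c0 d0 t0
        (by simp [PySem.List.pyGet?, PySem.List.pyIdx?]; rw [if_pos (by omega)]; simp),
      bRow _ 1 a1 b1 c1 d1 t1
        (by simp [PySem.List.pyGet?, PySem.List.pyIdx?]; rw [if_pos (by omega)]; simp),
      bRow _ 2 a2 b2 c2 d2 t2
        (by simp [PySem.List.pyGet?, PySem.List.pyIdx?]; rw [if_pos (by omega)]; simp),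
      bRow _ 3 a3 b3 c3 d3 t3
        (by simp [PySem.List.pyGet?, PySem.List.pyIdx?]; rw [if_pos (by omega)]; simp)]
  simp [padRow]
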